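-- pv_equiv track=rewrite | github.com/mispython/AimanPython | Conv_Py/DIBMIS01.py | with_asa
-- ===== SOURCE A (Python) =====
-- PAGE_LENGTH = 60
--
-- def with_asa(lines: list[str], page_length: int = PAGE_LENGTH) -> list[str]:
--     """Prepend ASA carriage-control characters. '1'=new page, ' '=single space, '0'=double space."""
--     out = []
--     line_in_page = 0
--     first_page = True
--     for i, line in enumerate(lines):
--         if line_in_page == 0:
--             asa = '1' if not first_page else '1'
--             first_page = False
--         else:
--             asa = ' '
--         out.append(asa + line)
--         line_in_page += 1
--         if line_in_page >= page_length:
--             line_in_page = 0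
--     return out
-- ===== SOURCE B (Python) =====
-- PAGE_LENGTH = 60
--
-- def with_asa(lines: list[str], page_length: int = PAGE_LENGTH) -> list[str]:
--     """Prepend ASA carriage-control characters. '1'=new page, ' '=single space."""
--     step = page_length if page_length > 0 else 1
--     out = []
--     for start in range(0, len(lines), step):
--         page = lines[start:start + step]
--         out.append('1' + page[0])
--         out.extend(' ' + l for l in page[1:])
--     return out
-- ===== Notes on version B (the rewrite author's own statement) =====
-- stated objective: alternative
-- what changed: B works page-by-page: it slices the input into pages of max(page_length,1) lines and emits each page as a '1'-prefixed head plus ' '-prefixed tail, instead of A's single per-line pass with a mutable line-in-page counter and first_page flag.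
import Mathlib
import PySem

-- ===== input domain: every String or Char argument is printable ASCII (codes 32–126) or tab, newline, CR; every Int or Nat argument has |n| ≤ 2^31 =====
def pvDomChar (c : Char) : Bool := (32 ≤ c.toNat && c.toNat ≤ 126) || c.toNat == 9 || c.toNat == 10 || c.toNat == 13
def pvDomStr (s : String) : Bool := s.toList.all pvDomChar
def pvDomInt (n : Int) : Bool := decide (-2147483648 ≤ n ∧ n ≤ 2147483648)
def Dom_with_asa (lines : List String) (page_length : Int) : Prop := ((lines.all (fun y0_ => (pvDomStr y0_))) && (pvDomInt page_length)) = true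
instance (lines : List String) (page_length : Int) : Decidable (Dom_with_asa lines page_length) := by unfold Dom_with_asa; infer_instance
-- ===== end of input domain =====

-- B processes the input page-by-page (slice per page: '1'-head plus ' '-tail) instead of
-- A's single per-line pass with a mutable counter; objective: alternative decomposition.


-- ===== PORT A =====
-- state: (out, line_in_page, first_page)
def withAsaStepA (page_length : Int) (st : List String × Int × Bool) (line : String) :
    List String × Int × Bool :=
  let out := st.1
  let lip := st.2.1
  let fp := st.2.2
  let asa : String := if lip == 0 then (if !fp then "1" else "1") else " "
  let fp' : Bool := if lip == 0 then false else fp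
  let out' := out ++ [asa ++ line]
  let lip' := lip + 1
  let lip'' := if lip' ≥ page_length then 0 else lip'
  (out', lip'', fp')

def with_asa (lines : List String) (page_length : Int) : List String :=
  (lines.foldl (withAsaStepA page_length) ([], 0, true)).1

-- ===== PORT B =====
-- one page at a time: head gets '1', the next k-1 lines get ' ', then the rest of the pages
def withAsaPages (k : Nat) : List String → List String
  | [] => []
  | l :: ls =>
      ("1" ++ l) :: ((ls.take (k - 1)).map (fun s => " " ++ s)
        ++ withAsaPages k (ls.drop (k - 1)))
termination_by xs => xs.length
decreasing_by simp

def with_asa_alt (lines : List String) (page_length : Int) : List String :=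
  let step : Nat := if page_length > 0 then page_length.toNat else 1
  withAsaPages step lines

-- ===== PRECONDITION & SPEC =====
def Spec_with_asa (lines : List String) (page_length : Int) (out : List String) : Prop := out = with_asa_alt lines page_length
instance (lines : List String) (page_length : Int) (out : List String) : Decidable (Spec_with_asa lines page_length out) := by unfold Spec_with_asa; infer_instance

-- ===== CLAIM (what is proved, stated in full; the proofs are below) =====
def Claim_equal_with_asa : Prop := ∀ (lines : List String) (page_length : Int), Dom_with_asa lines page_length → Spec_with_asa lines page_length (with_asa lines page_length)

-- ===== LEMMAS AND PROOFS =====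

-- non-positive page_length: A's counter resets after every line, so every line gets '1'
theorem foldA_nonpos (pl : Int) (hpl : pl ≤ 0) :
    ∀ (lines : List String) (out : List String) (fp : Bool),
      (lines.foldl (withAsaStepA pl) (out, 0, fp)).1
        = out ++ lines.map (fun line => "1" ++ line) := by
  intro lines
  induction lines with
  | nil => intro out fp; simp
  | cons l ls ih =>
    intro out fp
    have hge : ((0 : Int) + 1 ≥ pl) = True := by simp; omega
    simp only [List.foldl, withAsaStepA, List.map, hge, beq_self_eq_true, if_true]
    rw [ih]
    simp

-- positive page_length: A's line_in_page equals the global index mod page_length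
theorem foldA_pos (pl : Int) (hpl : 0 < pl) :
    ∀ (lines : List String) (i : Int), 0 ≤ i →
      ∀ (out : List String) (fp : Bool),
      (lines.foldl (withAsaStepA pl) (out, i % pl, fp)).1
        = out ++ (PySem.List.enumerate lines i).map
            (fun p => (if p.1 % pl == 0 then "1" else " ") ++ p.2) := by
  intro lines
  induction lines with
  | nil => intro i hi out fp; simp [PySem.List.enumerate_nil]
  | cons l ls ih =>
    intro i hi out fp
    have h0 : 0 ≤ i % pl := Int.emod_nonneg i (by omega)
    have h1 : i % pl < pl := Int.emod_lt_of_pos i hpl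
    have key : (i % pl + 1) % pl = (i + 1) % pl := Int.emod_add_emod i pl 1
    have hnext : (if i % pl + 1 ≥ pl then (0:Int) else i % pl + 1) = (i + 1) % pl := by
      by_cases h : i % pl + 1 ≥ pl
      · have he : i % pl + 1 = pl := by omega
        rw [if_pos h, ← key, he, Int.emod_self]
      · rw [if_neg h, ← key]
        exact (Int.emod_eq_of_lt (by omega) (by omega)).symm
    simp only [List.foldl, withAsaStepA, PySem.List.enumerate_cons, List.map]
    rw [hnext, ih (i + 1) (by omega)]
    by_cases h : i % pl = 0 <;> simp [h]

-- with page size 1 every line starts a page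
theorem pagesB_one : ∀ (lines : List String),
    withAsaPages 1 lines = lines.map (fun l => "1" ++ l) := by
  intro lines
  induction lines with
  | nil => simp [withAsaPages.eq_1]
  | cons l ls ih => rw [withAsaPages.eq_2]; simp [ih]

-- interior lines of a page: every index there is nonzero mod pl, so all get ' '
theorem map_enum_space (pl : Int) :
    ∀ (xs : List String) (s : Int),
      (∀ j : Int, s ≤ j → j < s + xs.length → ¬ j % pl = 0) →
      (PySem.List.enumerate xs s).map
          (fun p => (if p.1 % pl == 0 then "1" else " ") ++ p.2)
        = xs.map (fun l => " " ++ l) := by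
  intro xs
  induction xs with
  | nil => intro s h; simp [PySem.List.enumerate_nil]
  | cons x xs ih =>
    intro s h
    have hs : ¬ s % pl = 0 := h s (le_refl s) (by simp)
    simp only [PySem.List.enumerate_cons, List.map]
    rw [ih (s + 1) (fun j hj1 hj2 => h j (by omega) (by simp at hj2 ⊢; omega))]
    simp [hs]

-- an index strictly inside a page (start i, i % pl = 0) is nonzero mod pl
theorem mod_interior (pl i j : Int) (hmod : i % pl = 0)
    (h1 : i < j) (h2 : j < i + pl) : ¬ j % pl = 0 := by
  obtain ⟨q, hq⟩ := Int.dvd_of_emod_eq_zero hmod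
  have hj : j = (j - i) + pl * q := by omega
  have : j % pl = (j - i) % pl := by
    conv_lhs => rw [hj]
    exact Int.add_mul_emod_self_left ..
  rw [this, Int.emod_eq_of_lt (by omega) (by omega)]
  omega

-- B page recursion equals the positional enumerate form, at any page-start offset i
theorem pagesB_pos (pl : Int) (hpl : 0 < pl) :
    ∀ (n : Nat) (lines : List String), lines.length ≤ n →
      ∀ (i : Int), 0 ≤ i → i % pl = 0 →
      withAsaPages pl.toNat lines
        = (PySem.List.enumerate lines i).map
            (fun p => (if p.1 % pl == 0 then "1" else " ") ++ p.2) := by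
  intro n
  induction n with
  | zero =>
    intro lines hlen i _ _
    have : lines = [] := List.eq_nil_of_length_eq_zero (by omega)
    subst this; simp [withAsaPages.eq_1, PySem.List.enumerate_nil]
  | succ n ih =>
    intro lines hlen i hi hmod
    match lines with
    | [] => simp [withAsaPages.eq_1, PySem.List.enumerate_nil]
    | l :: ls =>
      have hk : (pl.toNat : Int) = pl := Int.toNat_of_nonneg (by omega)
      have hlen2 : ls.length ≤ n := by simp at hlen; omega
      rw [withAsaPages.eq_2]
      conv_rhs => rw [← List.take_append_drop (pl.toNat - 1) ls]
      rw [PySem.List.enumerate_cons, PySem.List.enumerate_append, List.map_cons, List.map_append]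
      have htk : ((ls.take (pl.toNat - 1)).length : Int) ≤ pl - 1 := by
        rw [← hk]; simp; omega
      rw [map_enum_space pl (ls.take (pl.toNat - 1)) (i + 1)
            (by intro j hj1 hj2; exact mod_interior pl i j hmod (by omega) (by omega))]
      by_cases hd : pl.toNat - 1 ≤ ls.length
      · have hlen' : ((ls.take (pl.toNat - 1)).length : Int) = pl - 1 := by
          rw [← hk]; simp; omega
        have hoff : i + 1 + ((ls.take (pl.toNat - 1)).length : Int) = i + pl := by
          rw [hlen']; ring
        rw [ih (ls.drop (pl.toNat - 1)) (by simp; omega)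
              (i + 1 + (ls.take (pl.toNat - 1)).length)
              (by omega) (by rw [hoff, Int.add_emod, hmod, Int.emod_self]; simp)]
        simp [hmod]
      · have hnil : ls.drop (pl.toNat - 1) = [] := by
          apply List.drop_eq_nil_of_le; omega
        rw [hnil]
        simp [withAsaPages.eq_1, PySem.List.enumerate_nil, hmod]

-- ===== VERDICT (by name: the statement is the Claim_ definition above) =====
theorem with_asa_spec : Claim_equal_with_asa := by
  intro lines pl _
  unfold Spec_with_asa with_asa with_asa_alt
  by_cases h : pl > 0
  · simp only [if_pos h]
    have hA := foldA_pos pl h lines 0 (by omega) [] true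
    rw [Int.zero_emod] at hA
    rw [hA, pagesB_pos pl h lines.length lines (le_refl _) 0 (by omega) (by simp)]
    simp
  · simp only [if_neg h]
    rw [foldA_nonpos pl (by omega) lines [] true, pagesB_one]
    simp
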